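-- pv_equiv track=rewrite | github.com/irisetto/IntroducereInPython | Lab3/ex6.py | count_elem
-- ===== SOURCE A (Python) =====
-- def count_elem(input_list):
--     unique_elements = set()
--     duplicate_elements = set()
--     for item in input_list:
--         if item in unique_elements:
--             duplicate_elements.add(item)
--             unique_elements.remove(item)
--         else:
--             unique_elements.add(item)
--
--     return len(unique_elements), len(duplicate_elements)
-- ===== SOURCE B (Python) =====
-- def count_elem(input_list):
--     counts = {}
--     for item in input_list:
--         counts[item] = counts.get(item, 0) + 1
--     odd = sum(1 for v in counts.values() if v % 2)
--     dup = sum(1 for v in counts.values() if v >= 2)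
--     return odd, dup
-- ===== Notes on version B (the rewrite author's own statement) =====
-- stated objective: simpler
-- what changed: Replaced A's parity-toggled pair of sets with one frequency-table pass followed by two scans over the distinct counts (odd count / count >= 2).
import Mathlib
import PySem

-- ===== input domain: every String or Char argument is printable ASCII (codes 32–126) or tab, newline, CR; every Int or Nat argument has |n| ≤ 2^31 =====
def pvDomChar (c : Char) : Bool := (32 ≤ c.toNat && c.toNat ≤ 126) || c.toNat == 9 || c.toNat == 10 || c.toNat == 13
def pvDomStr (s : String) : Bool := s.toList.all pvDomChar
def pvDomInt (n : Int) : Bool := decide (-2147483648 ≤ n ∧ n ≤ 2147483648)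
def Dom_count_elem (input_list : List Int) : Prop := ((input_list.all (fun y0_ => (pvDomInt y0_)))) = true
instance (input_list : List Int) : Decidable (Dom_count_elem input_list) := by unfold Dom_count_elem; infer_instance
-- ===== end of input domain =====

-- B replaces A's parity-toggled pair of sets with one frequency-table pass and two scans over the distinct counts (objective: simpler).

-- ===== PORT A =====
-- A's loop toggles `item` in/out of unique_elements and records duplicates.
-- In the first branch `item ∈ unique_elements` holds, so Python's `.remove` never raises and equals Set.discard.
def count_elem (input_list : List Int) : Int × Int :=
  let st := input_list.foldl
    (fun (st : PySem.Set Int × PySem.Set Int) item =>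
      if PySem.Set.contains st.1 item then
        (PySem.Set.discard st.1 item, PySem.Set.add st.2 item)
      else
        (PySem.Set.add st.1 item, st.2))
    (PySem.Set.empty, PySem.Set.empty)
  (PySem.Set.len st.1, PySem.Set.len st.2)

-- ===== PORT B =====
-- frequency table (counts[item] = counts.get(item, 0) + 1), then the two generator sums over counts.values()
def count_elem_alt (input_list : List Int) : Int × Int :=
  let counts : PySem.Dict Int Int :=
    input_list.foldl (fun d item => d.insert item (d.getD item 0 + 1)) PySem.Dict.empty
  let odd : Int := (counts.values.countP (fun v => PySem.Int.mod v 2 != 0) : Int)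
  let dup : Int := (counts.values.countP (fun v => 2 ≤ v) : Int)
  (odd, dup)

-- ===== PRECONDITION & SPEC =====
def Spec_count_elem (input_list : List Int) (out : Int × Int) : Prop := out = count_elem_alt input_list
instance (input_list : List Int) (out : Int × Int) : Decidable (Spec_count_elem input_list out) := by unfold Spec_count_elem; infer_instance

-- ===== CLAIM (what is proved, stated in full; the proofs are below) =====
def Claim_equal_count_elem : Prop := ∀ (input_list : List Int), Dom_count_elem input_list → Spec_count_elem input_list (count_elem input_list)

-- ===== LEMMAS AND PROOFS =====

lemma nodup_set_add (s : PySem.Set Int) (x : Int) (h : s.Nodup) : (PySem.Set.add s x).Nodup := by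
  unfold PySem.Set.add
  split <;> rename_i hc
  · exact h
  · simp only [PySem.Set.contains, List.contains_eq_mem, decide_eq_true_eq] at hc
    simp [List.nodup_append, h]
    exact fun a ha he => hc (he ▸ ha)

lemma mem_set_discard (s : PySem.Set Int) (a x : Int) :
    x ∈ PySem.Set.discard s a ↔ x ∈ s ∧ x ≠ a := by
  simp [PySem.Set.discard, List.mem_filter]

-- A's loop state after the whole list: membership in the two sets is parity / multiplicity of the count.
lemma count_elem_loop_inv (l : List Int) :
    let st := l.foldl
      (fun (st : PySem.Set Int × PySem.Set Int) item =>
        if PySem.Set.contains st.1 item then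
          (PySem.Set.discard st.1 item, PySem.Set.add st.2 item)
        else
          (PySem.Set.add st.1 item, st.2))
      (PySem.Set.empty, PySem.Set.empty)
    st.1.Nodup ∧ st.2.Nodup ∧
      (∀ x, x ∈ st.1 ↔ l.count x % 2 = 1) ∧ (∀ x, x ∈ st.2 ↔ 2 ≤ l.count x) := by
  induction l using List.reverseRecOn with
  | nil => simp [PySem.Set.empty]
  | append_singleton l a ih =>
    rw [List.foldl_append]
    obtain ⟨hn1, hn2, h1, h2⟩ := ih
    set st := l.foldl
      (fun (st : PySem.Set Int × PySem.Set Int) item =>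
        if PySem.Set.contains st.1 item then
          (PySem.Set.discard st.1 item, PySem.Set.add st.2 item)
        else
          (PySem.Set.add st.1 item, st.2))
      (PySem.Set.empty, PySem.Set.empty) with hst
    simp only [List.foldl_cons, List.foldl_nil]
    by_cases hc : PySem.Set.contains st.1 a
    · have ha : a ∈ st.1 := by simpa [PySem.Set.contains] using hc
      have hodd := (h1 a).mp ha
      simp only [hc, if_pos]
      refine ⟨hn1.filter _, nodup_set_add _ _ hn2, ?_, ?_⟩
      · intro x
        rw [mem_set_discard, h1 x, List.count_append, List.count_singleton']
        by_cases hxa : a = x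
        · subst hxa; simp; omega
        · simp [hxa, Ne.symm hxa]
      · intro x
        rw [PySem.Set.mem_add, h2 x, List.count_append, List.count_singleton']
        by_cases hxa : a = x
        · subst hxa; simp; exact List.count_pos_iff.mp (by omega)
        · simp [hxa, Ne.symm hxa]
    · have ha : a ∉ st.1 := by simpa [PySem.Set.contains] using hc
      have heven : ¬ l.count a % 2 = 1 := fun h => ha ((h1 a).mpr h)
      simp only [hc, if_neg, Bool.false_eq_true, not_false_iff]
      refine ⟨nodup_set_add _ _ hn1, hn2, ?_, ?_⟩
      · intro x
        rw [PySem.Set.mem_add, h1 x, List.count_append, List.count_singleton']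
        by_cases hxa : a = x
        · subst hxa; simp; omega
        · simp [hxa, Ne.symm hxa]
      · intro x
        rw [h2 x, List.count_append, List.count_singleton']
        by_cases hxa : a = x
        · subst hxa
          simp
          exact ⟨fun h => List.count_pos_iff.mp (by omega), fun h => by have := List.count_pos_iff.mpr h; omega⟩
        · simp [hxa]

-- two Nodup lists with the same membership have the same length (applied to A's set vs B's filtered distinct elements)
lemma nodup_len_eq (l : List Int) (s : List Int) (p : Int → Bool)
    (hs : s.Nodup) (hmem : ∀ x, x ∈ s ↔ x ∈ l ∧ p x = true) :
    s.length = ((PySem.Set.ofList l).filter p).length := by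
  apply List.Perm.length_eq
  rw [List.perm_ext_iff_of_nodup hs ((PySem.Set.nodup_ofList l).filter p)]
  intro x
  rw [hmem, List.mem_filter, PySem.Set.mem_ofList]

lemma values_count_fold (l : List Int) :
    (l.foldl (fun (d : PySem.Dict Int Int) item => d.insert item (d.getD item 0 + 1)) PySem.Dict.empty).values
      = (PySem.Set.ofList l).map (fun k => ((l.count k : Int))) := by
  rw [show (l.foldl (fun (d : PySem.Dict Int Int) item => d.insert item (d.getD item 0 + 1)) PySem.Dict.empty) = PySem.Dict.counter l from rfl]
  simp [PySem.Dict.values, PySem.Dict.items_counter]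

theorem count_elem_spec : Claim_equal_count_elem := by
  intro l _
  simp only [Spec_count_elem, count_elem, count_elem_alt]
  obtain ⟨hn1, hn2, h1, h2⟩ := count_elem_loop_inv l
  rw [values_count_fold l]
  simp only [List.countP_map]
  have hp1 : (fun v => PySem.Int.mod v 2 != 0) ∘ (fun k => ((l.count k : Int)))
      = fun k => decide (l.count k % 2 = 1) := by
    funext k
    simp only [Function.comp]
    rw [PySem.Int.mod_eq_emod_of_pos (by norm_num : (0:Int) < 2)]
    rw [show ((l.count k : Int)) % 2 = ((l.count k % 2 : Nat) : Int) from by push_cast; ring]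
    by_cases h : l.count k % 2 = 1
    · simp [h]
    · simp [h]; omega
  have hp2 : (fun v => decide (2 ≤ v)) ∘ (fun k => ((l.count k : Int)))
      = fun k => decide (2 ≤ l.count k) := by
    funext k
    simp only [Function.comp]
    norm_num
  rw [hp1, hp2, List.countP_eq_length_filter, List.countP_eq_length_filter]
  have len1 := nodup_len_eq l _ (fun k => decide (l.count k % 2 = 1)) hn1
    (fun x => by
      rw [h1 x]
      constructor
      · intro h; exact ⟨List.count_pos_iff.mp (by omega), by simpa using h⟩
      · intro ⟨_, h⟩; simpa using h)
  have len2 := nodup_len_eq l _ (fun k => decide (2 ≤ l.count k)) hn2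
    (fun x => by
      rw [h2 x]
      constructor
      · intro h; exact ⟨List.count_pos_iff.mp (by omega), by simpa using h⟩
      · intro ⟨_, h⟩; simpa using h)
  simp only [PySem.Set.len, len1, len2]
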